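-- pv_equiv track=rewrite | github.com/eh394/airbnb-data-science | scripts/neural_network.py | generate_nn_configs
-- ===== SOURCE A (Python) =====
-- import itertools
--
-- def generate_nn_configs(params):
--     permutations = itertools.product(*list(params.values()))
--     accums = []
--     for permutation in permutations:
--         acc = {key: value for key, value in zip(
--             list(params.keys()), permutation
--         )}
--         accums.append(acc)
--     return accums
-- ===== SOURCE B (Python) =====
-- def generate_nn_configs(params):
--     result = [{}]
--     for key, values in params.items():
--         result = [{**d, key: v} for d in result for v in values]
--     return result
-- ===== Notes on version B (the rewrite author's own statement) =====
-- stated objective: idiomatic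
-- what changed: Drops itertools.product over full value tuples and the per-tuple zip/dict-comprehension; instead folds over the params one key at a time, extending every partial config dict with each value of that key.
import Mathlib
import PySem

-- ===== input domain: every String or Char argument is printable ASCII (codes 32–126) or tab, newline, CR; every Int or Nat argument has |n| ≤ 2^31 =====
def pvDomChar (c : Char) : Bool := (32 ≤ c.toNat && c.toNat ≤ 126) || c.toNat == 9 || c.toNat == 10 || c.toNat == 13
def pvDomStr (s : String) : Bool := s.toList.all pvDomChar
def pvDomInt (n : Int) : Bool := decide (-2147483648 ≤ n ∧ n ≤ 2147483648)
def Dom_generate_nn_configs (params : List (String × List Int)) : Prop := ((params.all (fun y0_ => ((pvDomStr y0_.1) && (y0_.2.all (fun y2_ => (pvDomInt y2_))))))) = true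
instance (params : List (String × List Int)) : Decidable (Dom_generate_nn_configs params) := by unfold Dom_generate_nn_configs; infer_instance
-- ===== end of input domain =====

-- B builds the configs incrementally key by key instead of iterating itertools.product tuples; idiomatic, same cost.

-- ===== PORT A =====
-- itertools.product(*lists): first list varies slowest
def pyProduct : List (List Int) → List (List Int)
  | [] => [[]]
  | vs :: rest => vs.flatMap (fun v => (pyProduct rest).map (fun p => v :: p))

def generate_nn_configs (params : List (String × List Int)) : List (List (String × Int)) :=
  let permutations := pyProduct (params.map Prod.snd)
  let accums := permutations.foldl (fun accums perm =>
    let acc := ((params.map Prod.fst).zip perm).foldl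
      (fun d kv => d.insert kv.1 kv.2) (PySem.Dict.empty : PySem.Dict String Int)
    accums ++ [acc]) []
  accums.map PySem.Dict.items

-- ===== PORT B =====
def generate_nn_configs_alt (params : List (String × List Int)) : List (List (String × Int)) :=
  (params.foldl
    (fun result kv => result.flatMap (fun d => kv.2.map (fun v => d.insert kv.1 v)))
    [(PySem.Dict.empty : PySem.Dict String Int)]).map PySem.Dict.items

-- ===== PRECONDITION & SPEC =====
def Spec_generate_nn_configs (params : List (String × List Int)) (out : List (List (String × Int))) : Prop := out = generate_nn_configs_alt params
instance (params : List (String × List Int)) (out : List (List (String × Int))) : Decidable (Spec_generate_nn_configs params out) := by unfold Spec_generate_nn_configs; infer_instance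

-- ===== CLAIM (what is proved, stated in full; the proofs are below) =====
def Claim_equal_generate_nn_configs : Prop := ∀ (params : List (String × List Int)), Dom_generate_nn_configs params → Spec_generate_nn_configs params (generate_nn_configs params)

-- ===== LEMMAS AND PROOFS =====

-- A's accumulating append loop is a map
theorem foldl_append_map {α β : Type} (f : α → β) :
    ∀ (l : List α) (acc : List β),
      l.foldl (fun a x => a ++ [f x]) acc = acc ++ l.map f := by
  intro l
  induction l with
  | nil => simp
  | cons x xs ih => intro acc; simp [List.foldl, ih]

-- B's fold over the keys enumerates exactly the product tuples (first key slowest),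
-- building each dict by the same insert sequence as A's zip fold.
theorem alt_foldl_eq (params : List (String × List Int)) :
    ∀ (init : List (PySem.Dict String Int)),
      params.foldl
        (fun result kv => result.flatMap (fun d => kv.2.map (fun v => d.insert kv.1 v))) init
      = init.flatMap (fun d => (pyProduct (params.map Prod.snd)).map (fun perm =>
          ((params.map Prod.fst).zip perm).foldl (fun d kv => d.insert kv.1 kv.2) d)) := by
  induction params with
  | nil => intro init; simp [pyProduct]
  | cons p rest ih =>
    intro init
    simp only [List.foldl_cons, ih, pyProduct, List.map_cons]
    simp only [List.flatMap_assoc]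
    congr 1
    funext x
    rw [List.flatMap_map, List.map_flatMap]
    congr 1
    funext v
    rw [List.map_map]
    congr 1

-- ===== VERDICT (by name: the statement is the Claim_ definition above) =====
theorem generate_nn_configs_spec : Claim_equal_generate_nn_configs := by
  intro params _
  show generate_nn_configs params = generate_nn_configs_alt params
  simp only [generate_nn_configs, generate_nn_configs_alt, alt_foldl_eq, foldl_append_map]
  simp
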